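-- pv_equiv track=rewrite | github.com/YaoChiehYao/Motifs_N_ComputerSetup | yaochieh_yao.py | scanSeq
-- ===== SOURCE A (Python) =====
-- def score_motif(motif):
--     """
--     This function takes in a 13bp sequence and returns the score
--     """
--     # letter to number matching for index
--     base_idx = {'A': 0, 'T': 1, 'C': 2, 'G': 3}
--     motif_score = [[.5, .5, .5, .5, 0, 0, 0, 0, 0, 2, -99, -99, .5],  # A
--                    [0, 0, 0, 0, 0, 0, 0, 0, 0, -99, 2, -99, 0],  # T
--                    [0, 0, 0, 0, 0, 0, 0, 0, 0, -99, -99, -99, 0],  # C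
--                    [.5, .5, .5, .5, 0, 0, 0, 0, 0, .5, -99, 2, 0]]  # G
--     indexes = [base_idx[base] for base in motif if base in base_idx]
--
--     scores = []
--     for idx, value in enumerate(indexes):
--         if 0 <= value < len(motif_score) and 0 <= idx < len(motif_score[value]):
--             scores.append(motif_score[value][idx])
--         else:
--             # Handle the case where the index is out of range
--             scores.append(0)
--
--     return sum(scores)
--
-- def find_ORFs(sequence):
--     """
--     This function continues with passed motifs to work on using
--     the starting positions to find possible orfs with a stop
--     codon in the sequence.
--     """
--     stop_codons = ['TAA', 'TAG', 'TGA']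
--     orfs = []
--     for i in range(0, len(sequence)-2, 3):
--         codon = sequence[i:i+3]
--
--         if codon in stop_codons:
--             orfs.append(sequence[0:i+3])
--
--     return orfs
--
-- def scanSeq(sequence):
--     """
--     Takes in a sequence and returns an array of sequences,
--     an array of corresponding ORF start positions, and an
--     array of corresponding ORF lengths
--     """
--     motifs = [sequence[i:i+13]
--               for i in range(len(sequence)-12) if score_motif(sequence[i:i+13]) > 7.25]
--     start_pos = [i for i in range(len(sequence)-12)
--                  if score_motif(sequence[i:i+13]) > 7.25]
--
--     orfs = []
--
--     for motif, start in zip(motifs, start_pos):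
--         start_indices = [j for j in range(
--             len(motif)) if motif[j:j+3] in {'ATG', 'GTG'}]
--
--         for index in start_indices:
--             starting = start + index
--             identified_orfs = find_ORFs(sequence[starting:])
--
--             if identified_orfs:
--                 orfs.extend(identified_orfs)
--
--     len_orf = [len(orf) for orf in orfs]
--
--     return start_pos, len_orf, orfs
-- ===== SOURCE B (Python) =====
-- def _score(sequence, i):
--     # position-weight matrix in quarter units (0.5 -> 2, 2 -> 8, -99 -> -396);
--     # all of A's weights are multiples of 0.25, so the float sum is exact and
--     # the > 7.25 test becomes an exact integer test > 29.
--     weights = {'A': (2, 2, 2, 2, 0, 0, 0, 0, 0, 8, -396, -396, 2),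
--                'T': (0, 0, 0, 0, 0, 0, 0, 0, 0, -396, 8, -396, 0),
--                'C': (0, 0, 0, 0, 0, 0, 0, 0, 0, -396, -396, -396, 0),
--                'G': (2, 2, 2, 2, 0, 0, 0, 0, 0, 2, -396, 8, 0)}
--     total = 0
--     k = 0
--     for c in sequence[i:i+13]:
--         row = weights.get(c)
--         if row is not None:
--             total += row[k]
--             k += 1
--     return total
--
--
-- def scanSeq(sequence):
--     """
--     Index-based rewrite: precompute the stop-codon positions of the whole
--     sequence ONCE; score each 13bp window once; for a hit, start codons are
--     looked up directly in the sequence (j in range(11): a codon must fit in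
--     the window) and each ORF is read off the precomputed stop index instead
--     of re-scanning the tail codon by codon.
--     """
--     n = len(sequence)
--     stops = [p for p in range(n - 2) if sequence[p:p+3] in ('TAA', 'TAG', 'TGA')]
--     start_pos = []
--     orfs = []
--     for i in range(n - 12):
--         if _score(sequence, i) > 29:
--             start_pos.append(i)
--             for j in range(11):
--                 s = i + j
--                 if sequence[s:s+3] in ('ATG', 'GTG'):
--                     for p in stops:
--                         if p >= s and (p - s) % 3 == 0:
--                             orfs.append(sequence[s:p+3])
--     return start_pos, [len(o) for o in orfs], orfs
-- ===== Notes on version B (the rewrite author's own statement) =====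
-- stated objective: faster
-- what changed: Instead of A's two score-recomputing comprehensions, zip loop and a fresh codon-by-codon tail rescan (find_ORFs) for every start codon, B precomputes the stop-codon position index of the whole sequence once, scores each 13bp window exactly once in integer quarter units, reads start codons directly off the sequence (j in range(11)), and emits each ORF by filtering the precomputed stop index by frame.
import Mathlib
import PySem

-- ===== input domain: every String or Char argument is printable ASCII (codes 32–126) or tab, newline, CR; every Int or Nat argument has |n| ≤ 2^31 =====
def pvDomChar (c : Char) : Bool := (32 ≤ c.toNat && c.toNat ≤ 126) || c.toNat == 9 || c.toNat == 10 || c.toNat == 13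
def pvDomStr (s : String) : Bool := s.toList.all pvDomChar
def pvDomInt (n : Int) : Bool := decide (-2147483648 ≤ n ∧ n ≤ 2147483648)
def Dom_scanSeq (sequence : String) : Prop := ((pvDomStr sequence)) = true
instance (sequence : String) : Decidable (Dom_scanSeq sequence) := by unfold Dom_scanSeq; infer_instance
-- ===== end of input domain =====

-- B replaces A's repeated tail scans (find_ORFs re-reads the sequence codon by codon for every
-- start) by ONE precomputed index of stop-codon positions that each start filters, scores each
-- 13bp window once instead of twice, and reads start codons off the sequence directly.
-- All Python float scores are multiples of 0.25 and their sums are exact in IEEE doubles, so both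
-- ports use exact integer quarter units (0.5→2, 2→8, -99→-396, threshold 7.25→29).

-- ===== PORT A =====
def pvBaseIdx : PySem.Dict Char Int := PySem.Dict.ofList [('A', 0), ('T', 1), ('C', 2), ('G', 3)]

def pvMotifScore : List (List Int) :=
  [[2, 2, 2, 2, 0, 0, 0, 0, 0, 8, -396, -396, 2],
   [0, 0, 0, 0, 0, 0, 0, 0, 0, -396, 8, -396, 0],
   [0, 0, 0, 0, 0, 0, 0, 0, 0, -396, -396, -396, 0],
   [2, 2, 2, 2, 0, 0, 0, 0, 0, 2, -396, 8, 0]]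

def scoreMotifA (motif : List Char) : Int :=
  let indexes := (motif.filter (fun b => PySem.Dict.contains pvBaseIdx b)).map
      (fun b => PySem.Dict.getD pvBaseIdx b 0)
  let scores := (PySem.List.enumerate indexes 0).foldl (fun acc p =>
      if 0 ≤ p.2 ∧ p.2 < PySem.List.len pvMotifScore ∧
         0 ≤ p.1 ∧ p.1 < PySem.List.len (PySem.List.pyGetD pvMotifScore p.2 []) then
        acc ++ [PySem.List.pyGetD (PySem.List.pyGetD pvMotifScore p.2 []) p.1 0]
      else acc ++ [0]) []
  scores.sum

def pvStops : List (List Char) := ["TAA".toList, "TAG".toList, "TGA".toList]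

def findORFsA (sequence : List Char) : List (List Char) :=
  (PySem.List.pyRange 0 (PySem.List.len sequence - 2) 3).foldl (fun orfs i =>
    let codon := PySem.List.slice sequence (some i) (some (i + 3))
    if codon ∈ pvStops then orfs ++ [PySem.List.slice sequence (some 0) (some (i + 3))]
    else orfs) []

def pvStartSet : PySem.Set (List Char) := PySem.Set.ofList ["ATG".toList, "GTG".toList]

def scanSeq (sequence : String) : List Int × List Int × List String :=
  let cs := sequence.toList
  let n := PySem.List.len cs
  let motifs := ((PySem.List.pyRange 0 (n - 12) 1).filter
      (fun i => decide (29 < scoreMotifA (PySem.List.slice cs (some i) (some (i + 13)))))).map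
      (fun i => PySem.List.slice cs (some i) (some (i + 13)))
  let start_pos := (PySem.List.pyRange 0 (n - 12) 1).filter
      (fun i => decide (29 < scoreMotifA (PySem.List.slice cs (some i) (some (i + 13)))))
  let orfs := (motifs.zip start_pos).foldl (fun orfs p =>
      let start_indices := (PySem.List.pyRange 0 (PySem.List.len p.1) 1).filter
          (fun j => PySem.Set.contains pvStartSet (PySem.List.slice p.1 (some j) (some (j + 3))))
      start_indices.foldl (fun orfs index =>
        let starting := p.2 + index
        let identified := findORFsA (PySem.List.slice cs (some starting) none)
        if identified ≠ [] then orfs ++ identified else orfs) orfs) []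
  let len_orf := orfs.map (fun o => PySem.List.len o)
  (start_pos, len_orf, orfs.map String.ofList)

-- ===== PORT B =====
def pvTable : PySem.Dict Char (List Int) := PySem.Dict.ofList
  [('A', [2, 2, 2, 2, 0, 0, 0, 0, 0, 8, -396, -396, 2]),
   ('T', [0, 0, 0, 0, 0, 0, 0, 0, 0, -396, 8, -396, 0]),
   ('C', [0, 0, 0, 0, 0, 0, 0, 0, 0, -396, -396, -396, 0]),
   ('G', [2, 2, 2, 2, 0, 0, 0, 0, 0, 2, -396, 8, 0])]

def pvStartB : List (List Char) := ["ATG".toList, "GTG".toList]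

def scoreB (cs : List Char) (i : Int) : Int :=
  ((PySem.List.slice cs (some i) (some (i + 13))).foldl (fun (s : Int × Int) c =>
      match PySem.Dict.get? pvTable c with
      | some row => (s.1 + PySem.List.pyGetD row s.2 0, s.2 + 1)
      | none => s) (0, 0)).1

def scanSeq_alt (sequence : String) : List Int × List Int × List String :=
  let cs := sequence.toList
  let n := PySem.List.len cs
  let stops := (PySem.List.pyRange 0 (n - 2) 1).filter
      (fun p => decide (PySem.List.slice cs (some p) (some (p + 3)) ∈ pvStops))
  let res := (PySem.List.pyRange 0 (n - 12) 1).foldl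
      (fun (acc : List Int × List (List Char)) i =>
        if 29 < scoreB cs i then
          (acc.1 ++ [i],
           (PySem.List.pyRange 0 11 1).foldl (fun orfs j =>
             let s := i + j
             if PySem.List.slice cs (some s) (some (s + 3)) ∈ pvStartB then
               stops.foldl (fun orfs p =>
                 if s ≤ p ∧ PySem.Int.mod (p - s) 3 = 0 then
                   orfs ++ [PySem.List.slice cs (some s) (some (p + 3))]
                 else orfs) orfs
             else orfs) acc.2)
        else acc) ([], [])
  (res.1, res.2.map (fun o => PySem.List.len o), res.2.map String.ofList)

-- ===== PRECONDITION & SPEC =====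
def Spec_scanSeq (sequence : String) (out : List Int × List Int × List String) : Prop := out = scanSeq_alt sequence
instance (sequence : String) (out : List Int × List Int × List String) : Decidable (Spec_scanSeq sequence out) := by unfold Spec_scanSeq; infer_instance

-- ===== CLAIM (what is proved, stated in full; the proofs are below) =====
def Claim_equal_scanSeq : Prop := ∀ (sequence : String), Dom_scanSeq sequence → Spec_scanSeq sequence (scanSeq sequence)

-- ===== LEMMAS AND PROOFS =====

-- qscore m k: total score contributed by m when the next A/T/C/G column is k (proof-side only)
def qscore : List Char → Int → Int
  | [], _ => 0
  | c :: cs, k =>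
    match PySem.Dict.get? pvTable c with
    | some row => (if k < 13 then PySem.List.pyGetD row k 0 else 0) + qscore cs (k + 1)
    | none => qscore cs k

theorem tableSome (c : Char) (row : List Int) (h : PySem.Dict.get? pvTable c = some row) :
    PySem.Dict.contains pvBaseIdx c = true ∧
    PySem.List.pyGetD pvMotifScore (PySem.Dict.getD pvBaseIdx c 0) [] = row ∧
    0 ≤ PySem.Dict.getD pvBaseIdx c 0 ∧
    PySem.Dict.getD pvBaseIdx c 0 < PySem.List.len pvMotifScore ∧
    PySem.List.len row = 13 := by
  by_cases hA : 'A' = c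
  · subst hA; rw [show pvTable.get? 'A' = some ([2, 2, 2, 2, 0, 0, 0, 0, 0, 8, -396, -396, 2] : List Int) from by decide] at h; injection h with h; subst h; decide
  by_cases hT : 'T' = c
  · subst hT; rw [show pvTable.get? 'T' = some ([0, 0, 0, 0, 0, 0, 0, 0, 0, -396, 8, -396, 0] : List Int) from by decide] at h; injection h with h; subst h; decide
  by_cases hC : 'C' = c
  · subst hC; rw [show pvTable.get? 'C' = some ([0, 0, 0, 0, 0, 0, 0, 0, 0, -396, -396, -396, 0] : List Int) from by decide] at h; injection h with h; subst h; decide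
  by_cases hG : 'G' = c
  · subst hG; rw [show pvTable.get? 'G' = some ([2, 2, 2, 2, 0, 0, 0, 0, 0, 2, -396, 8, 0] : List Int) from by decide] at h; injection h with h; subst h; decide
  · exfalso
    rw [show pvTable = PySem.Dict.mk
      [('A', [2, 2, 2, 2, 0, 0, 0, 0, 0, 8, -396, -396, 2]),
       ('T', [0, 0, 0, 0, 0, 0, 0, 0, 0, -396, 8, -396, 0]),
       ('C', [0, 0, 0, 0, 0, 0, 0, 0, 0, -396, -396, -396, 0]),
       ('G', [2, 2, 2, 2, 0, 0, 0, 0, 0, 2, -396, 8, 0])] from by decide] at h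
    simp [hA, hT, hC, hG, PySem.Dict.get?] at h

theorem tableNone (c : Char) (h : PySem.Dict.get? pvTable c = none) :
    PySem.Dict.contains pvBaseIdx c = false := by
  by_cases hA : 'A' = c
  · subst hA; simp [pvTable] at h; revert h; decide
  by_cases hT : 'T' = c
  · subst hT; simp [pvTable] at h; revert h; decide
  by_cases hC : 'C' = c
  · subst hC; simp [pvTable] at h; revert h; decide
  by_cases hG : 'G' = c
  · subst hG; simp [pvTable] at h; revert h; decide
  · rw [show pvBaseIdx = PySem.Dict.mk [('A', 0), ('T', 1), ('C', 2), ('G', 3)] from by decide]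
    simp [PySem.Dict.contains_mk, hA, hT, hC, hG]

theorem qscore_A (m : List Char) : ∀ (k : Nat),
    ((PySem.List.enumerate ((m.filter (fun b => PySem.Dict.contains pvBaseIdx b)).map
        (fun b => PySem.Dict.getD pvBaseIdx b 0)) (k : Int)).map (fun p =>
      if 0 ≤ p.2 ∧ p.2 < PySem.List.len pvMotifScore ∧
         0 ≤ p.1 ∧ p.1 < PySem.List.len (PySem.List.pyGetD pvMotifScore p.2 []) then
        PySem.List.pyGetD (PySem.List.pyGetD pvMotifScore p.2 []) p.1 0
      else 0)).sum = qscore m k := by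
  induction m with
  | nil => intro k; simp [qscore]
  | cons c cs ih =>
    intro k
    cases hc : PySem.Dict.get? pvTable c with
    | none =>
      have hb := tableNone c hc
      simp only [qscore, hc, List.filter_cons, hb]
      exact ih k
    | some row =>
      obtain ⟨hb, hrow, h0, h4, hlen⟩ := tableSome c row hc
      simp only [qscore, hc, List.filter_cons, hb, if_true, List.map_cons,
        PySem.List.enumerate_cons, List.sum_cons, hrow, hlen]
      have : ((k : Int) + 1) = ((k + 1 : Nat) : Int) := by push_cast; ring
      rw [this, ih (k + 1)]
      congr 1
      by_cases hk : (k : Int) < 13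
      · rw [if_pos hk, if_pos ⟨h0, h4, by positivity, by omega⟩]
      · rw [if_neg hk, if_neg (by push Not; intro _ _ _; omega)]

-- B's scoring loop has no '< 13' guard: on windows of length ≤ 13 the column counter never reaches 13
theorem qscore_B (m : List Char) : ∀ (t k : Int), 0 ≤ k → (m.length : Int) + k ≤ 13 →
    (m.foldl (fun (s : Int × Int) c =>
      match PySem.Dict.get? pvTable c with
      | some row => (s.1 + PySem.List.pyGetD row s.2 0, s.2 + 1)
      | none => s) (t, k)).1 = t + qscore m k := by
  induction m with
  | nil => intro t k _ _; simp [qscore]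
  | cons c cs ih =>
    intro t k hk hlen
    simp only [List.length_cons] at hlen
    cases hc : PySem.Dict.get? pvTable c with
    | none => simp only [List.foldl_cons, hc, qscore]; exact ih t k hk (by push_cast at hlen ⊢; omega)
    | some row =>
      simp only [List.foldl_cons, hc, qscore]
      rw [ih _ (k + 1) (by omega) (by push_cast at hlen ⊢; omega),
          if_pos (show k < 13 by push_cast at hlen; omega)]
      ring

theorem window_len (cs : List Char) (i : Int) (h0 : 0 ≤ i) (h1 : i + 13 ≤ (cs.length : Int)) :
    PySem.List.len (PySem.List.slice cs (some i) (some (i + 13))) = 13 := by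
  rw [PySem.List.slice_of_nonneg cs h0 (by omega) (by omega) h1]
  simp [PySem.List.len_eq]
  omega

theorem score_eq (cs : List Char) (i : Int) (h0 : 0 ≤ i) (h1 : i + 13 ≤ (cs.length : Int)) :
    scoreMotifA (PySem.List.slice cs (some i) (some (i + 13))) = scoreB cs i := by
  have hw : ((PySem.List.slice cs (some i) (some (i + 13))).length : Int) = 13 := by
    have := window_len cs i h0 h1
    rwa [PySem.List.len_eq] at this
  simp only [scoreMotifA, scoreB]
  rw [show (fun (acc : List Int) (p : Int × Int) =>
      if 0 ≤ p.2 ∧ p.2 < PySem.List.len pvMotifScore ∧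
         0 ≤ p.1 ∧ p.1 < PySem.List.len (PySem.List.pyGetD pvMotifScore p.2 []) then
        acc ++ [PySem.List.pyGetD (PySem.List.pyGetD pvMotifScore p.2 []) p.1 0]
      else acc ++ [0]) = (fun acc p =>
      acc ++ [if 0 ≤ p.2 ∧ p.2 < PySem.List.len pvMotifScore ∧
         0 ≤ p.1 ∧ p.1 < PySem.List.len (PySem.List.pyGetD pvMotifScore p.2 []) then
        PySem.List.pyGetD (PySem.List.pyGetD pvMotifScore p.2 []) p.1 0 else 0])
    from by funext acc p; split_ifs <;> rfl]
  rw [PySem.List.foldl_append_singleton_eq_map, List.nil_append]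
  have hA := qscore_A (PySem.List.slice cs (some i) (some (i + 13))) 0
  simp only [Nat.cast_zero] at hA
  rw [hA, qscore_B _ 0 0 le_rfl (by omega)]
  simp

-- the crux of the ORF-phase equivalence: the step-3 offsets of a tail, shifted by the start s,
-- are exactly the whole-sequence positions ≥ s in s's reading frame
theorem range3_eq (N s : Int) (h0 : 0 ≤ s) :
    ((PySem.List.pyRange 0 (N - s - 2) 3).map (fun k => s + k))
      = (PySem.List.pyRange 0 (N - 2) 1).filter
          (fun p => decide (s ≤ p ∧ PySem.Int.mod (p - s) 3 = 0)) := by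
  have hmemL : ∀ x : Int, (x ∈ (PySem.List.pyRange 0 (N - s - 2) 3).map (fun k => s + k)) ↔
      (s ≤ x ∧ x < N - 2 ∧ (3 : Int) ∣ (x - s)) := by
    intro x
    simp only [List.mem_map, PySem.List.mem_pyRange_iff_of_pos (by norm_num : (0:Int) < 3)]
    constructor
    · rintro ⟨k, ⟨hk0, hk1, hk3⟩, rfl⟩
      simp only [Int.sub_zero] at hk3
      refine ⟨by omega, by omega, by simpa using hk3⟩
    · rintro ⟨hx0, hx1, hx3⟩
      exact ⟨x - s, ⟨by omega, by omega, by simpa using hx3⟩, by omega⟩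
  have hmemR : ∀ x : Int, (x ∈ (PySem.List.pyRange 0 (N - 2) 1).filter
      (fun p => decide (s ≤ p ∧ PySem.Int.mod (p - s) 3 = 0))) ↔
      (s ≤ x ∧ x < N - 2 ∧ (3 : Int) ∣ (x - s)) := by
    intro x
    simp only [List.mem_filter, PySem.List.mem_pyRange_one, decide_eq_true_eq,
      PySem.Int.mod_eq_zero_iff_dvd]
    omega
  have hpwL : List.Pairwise (· < ·) ((PySem.List.pyRange 0 (N - s - 2) 3).map (fun k => s + k)) := by
    rw [PySem.List.pyRange_of_pos 0 (N - s - 2) (by norm_num), List.map_map]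
    rw [List.pairwise_map]
    exact List.pairwise_lt_range.imp (by intro a b h; simp only [Function.comp_apply]; omega)
  have hpwR : List.Pairwise (· < ·) ((PySem.List.pyRange 0 (N - 2) 1).filter
      (fun p => decide (s ≤ p ∧ PySem.Int.mod (p - s) 3 = 0))) :=
    (PySem.List.pairwise_lt_pyRange_one 0 (N - 2)).filter _
  refine List.Perm.eq_of_pairwise (le := (· < ·)) (fun a b _ _ hab hba => by omega) hpwL hpwR ?_
  refine (List.perm_ext_iff_of_nodup ?_ ?_).mpr (fun x => (hmemL x).trans (hmemR x).symm)
  · exact hpwL.imp (fun h => by omega)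
  · exact hpwR.imp (fun h => by omega)

-- slice composition facts used below
theorem slice_tail_codon (cs : List Char) (s k : Int) (h0 : 0 ≤ s) (hk : 0 ≤ k) :
    PySem.List.slice (cs.drop s.toNat) (some k) (some (k + 3))
      = PySem.List.slice cs (some (s + k)) (some (s + k + 3)) := by
  rw [PySem.List.slice_toNat _ hk (by omega), PySem.List.slice_toNat _ (by omega) (by omega),
      List.drop_drop]
  have e1 : (k + 3).toNat - k.toNat = (s + k + 3).toNat - (s + k).toNat := by omega
  have e2 : s.toNat + k.toNat = (s + k).toNat := by omega
  rw [e1, e2]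

theorem slice_tail_prefix (cs : List Char) (s k : Int) (h0 : 0 ≤ s) (hk : 0 ≤ k) :
    PySem.List.slice (cs.drop s.toNat) none (some (k + 3))
      = PySem.List.slice cs (some s) (some (s + k + 3)) := by
  rw [PySem.List.slice_to _ (by omega), PySem.List.slice_toNat _ h0 (by omega)]
  have e1 : (k + 3).toNat = (s + k + 3).toNat - s.toNat := by omega
  rw [e1]

-- A's per-start tail scan = B's filter of the precomputed stop index
theorem orfs_eq (cs : List Char) (s : Int) (h0 : 0 ≤ s) (h1 : s ≤ (cs.length : Int))
    (o : List (List Char)) :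
    (if findORFsA (PySem.List.slice cs (some s) none) ≠ [] then
        o ++ findORFsA (PySem.List.slice cs (some s) none) else o)
    = ((PySem.List.pyRange 0 (PySem.List.len cs - 2) 1).filter
        (fun p => decide (PySem.List.slice cs (some p) (some (p + 3)) ∈ pvStops))).foldl
        (fun orfs p => if s ≤ p ∧ PySem.Int.mod (p - s) 3 = 0 then
            orfs ++ [PySem.List.slice cs (some s) (some (p + 3))]
          else orfs) o := by
  have htail : PySem.List.slice cs (some s) none = cs.drop s.toNat := PySem.List.slice_from cs h0
  have hlen : PySem.List.len (cs.drop s.toNat) = (cs.length : Int) - s := by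
    rw [PySem.List.len_eq]; simp; omega
  have hk0 : ∀ k ∈ PySem.List.pyRange 0 ((cs.length : Int) - s - 2) 3, 0 ≤ k := fun k hk =>
    ((PySem.List.mem_pyRange_iff_of_pos (by norm_num : (0:Int) < 3) k).mp hk).1
  have hfind : findORFsA (PySem.List.slice cs (some s) none)
      = ((PySem.List.pyRange 0 ((cs.length : Int) - s - 2) 3).filter
          (fun k => decide (PySem.List.slice (cs.drop s.toNat) (some k) (some (k + 3)) ∈ pvStops))).map
          (fun k => PySem.List.slice (cs.drop s.toNat) none (some (k + 3))) := by
    rw [htail]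
    unfold findORFsA
    rw [hlen]
    simp only [PySem.List.slice_zero_start]
    rw [PySem.List.foldl_append_ite
        (p := fun k => PySem.List.slice (cs.drop s.toNat) (some k) (some (k + 3)) ∈ pvStops)
        (f := fun k => PySem.List.slice (cs.drop s.toNat) none (some (k + 3))),
      List.nil_append]
  have hmain : findORFsA (PySem.List.slice cs (some s) none)
      = (((PySem.List.pyRange 0 (PySem.List.len cs - 2) 1).filter
          (fun p => decide (PySem.List.slice cs (some p) (some (p + 3)) ∈ pvStops))).filter
          (fun p => decide (s ≤ p ∧ PySem.Int.mod (p - s) 3 = 0))).map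
          (fun p => PySem.List.slice cs (some s) (some (p + 3))) := by
    have hcomm : (((PySem.List.pyRange 0 (PySem.List.len cs - 2) 1).filter
          (fun p => decide (PySem.List.slice cs (some p) (some (p + 3)) ∈ pvStops))).filter
          (fun p => decide (s ≤ p ∧ PySem.Int.mod (p - s) 3 = 0)))
        = (((PySem.List.pyRange 0 (PySem.List.len cs - 2) 1).filter
          (fun p => decide (s ≤ p ∧ PySem.Int.mod (p - s) 3 = 0))).filter
          (fun p => decide (PySem.List.slice cs (some p) (some (p + 3)) ∈ pvStops))) := by
      rw [List.filter_filter, List.filter_filter]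
      exact List.filter_congr (fun x _ => Bool.and_comm _ _)
    rw [hfind, hcomm, PySem.List.len_eq, ← range3_eq (cs.length : Int) s h0,
        List.filter_map, List.map_map]
    rw [List.filter_congr (fun k hk => by
          rw [slice_tail_codon cs s k h0 (hk0 k hk)])]
    apply List.map_congr_left
    intro k hk
    have hk' : 0 ≤ k := hk0 k (List.mem_of_mem_filter hk)
    rw [slice_tail_prefix cs s k h0 hk']
    rfl
  rw [PySem.List.foldl_append_ite
      (p := fun p => s ≤ p ∧ PySem.Int.mod (p - s) 3 = 0)
      (f := fun p => PySem.List.slice cs (some s) (some (p + 3)))]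
  rw [hmain]
  split_ifs with h
  · rfl
  · simp only [ne_eq, not_not] at h
    rw [h, List.append_nil]

theorem startLen3 (x : List Char) (hx : x ∈ pvStartB) : x.length = 3 := by
  simp only [pvStartB, List.mem_cons, List.not_mem_nil, or_false] at hx
  rcases hx with rfl | rfl <;> decide

theorem contains_start (x : List Char) :
    PySem.Set.contains pvStartSet x = decide (x ∈ pvStartB) := by
  have h : PySem.Set.contains pvStartSet x = true ↔ x ∈ pvStartB := by
    simp [pvStartSet, pvStartB, PySem.Set.contains, PySem.Set.mem_ofList]
  cases hc : PySem.Set.contains pvStartSet x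
  · rw [hc] at h
    symm
    simp only [decide_eq_false_iff_not]
    intro hm
    exact absurd (h.mpr hm) (by simp)
  · symm
    simp only [decide_eq_true_eq]
    exact h.mp hc

theorem far_no_start (w : List Char) (hw : w.length = 13) (j : Int) (hj : 11 ≤ j) (hj2 : j ≤ 12) :
    PySem.Set.contains pvStartSet (PySem.List.slice w (some j) (some (j + 3))) = false := by
  rw [contains_start, decide_eq_false_iff_not]
  intro hm
  have h3 := startLen3 _ hm
  rw [PySem.List.slice_toNat _ (by omega) (by omega)] at h3
  simp only [List.length_take, List.length_drop, hw] at h3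
  omega

theorem slice_window (cs : List Char) (i j : Int) (h0 : 0 ≤ i) (h1 : i + 13 ≤ (cs.length : Int))
    (hj : 0 ≤ j) (hj2 : j + 3 ≤ 13) :
    PySem.List.slice (PySem.List.slice cs (some i) (some (i + 13))) (some j) (some (j + 3))
      = PySem.List.slice cs (some (i + j)) (some (i + j + 3)) := by
  rw [PySem.List.slice_of_nonneg cs h0 (by omega) (by omega) h1,
      PySem.List.slice_toNat _ hj (by omega),
      PySem.List.slice_toNat _ (by omega) (by omega),
      List.drop_take, List.drop_drop, List.take_take]
  have e1 : min ((j + 3).toNat - j.toNat) (((i + 13).toNat - i.toNat) - j.toNat)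
      = (i + j + 3).toNat - (i + j).toNat := by omega
  have e2 : i.toNat + j.toNat = (i + j).toNat := by omega
  rw [e1, e2]

theorem inner_eq (cs : List Char) (i : Int) (h0 : 0 ≤ i) (h1 : i + 13 ≤ (cs.length : Int))
    (acc : List (List Char)) :
    ((PySem.List.pyRange 0 (PySem.List.len (PySem.List.slice cs (some i) (some (i + 13)))) 1).filter
        (fun j => PySem.Set.contains pvStartSet
          (PySem.List.slice (PySem.List.slice cs (some i) (some (i + 13))) (some j) (some (j + 3))))).foldl
      (fun orfs index =>
        let identified := findORFsA (PySem.List.slice cs (some (i + index)) none)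
        if identified ≠ [] then orfs ++ identified else orfs) acc
    = (PySem.List.pyRange 0 11 1).foldl (fun orfs j =>
        if PySem.List.slice cs (some (i + j)) (some (i + j + 3)) ∈ pvStartB then
          ((PySem.List.pyRange 0 (PySem.List.len cs - 2) 1).filter
            (fun p => decide (PySem.List.slice cs (some p) (some (p + 3)) ∈ pvStops))).foldl
            (fun orfs p => if i + j ≤ p ∧ PySem.Int.mod (p - (i + j)) 3 = 0 then
                orfs ++ [PySem.List.slice cs (some (i + j)) (some (p + 3))]
              else orfs) orfs
        else orfs) acc := by
  have hw : (PySem.List.slice cs (some i) (some (i + 13))).length = 13 := by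
    have := window_len cs i h0 h1
    rw [PySem.List.len_eq] at this
    exact_mod_cast this
  rw [window_len cs i h0 h1,
      show PySem.List.pyRange 0 13 1 = PySem.List.pyRange 0 11 1 ++ [11, 12] from by decide,
      List.filter_append]
  rw [show List.filter (fun j => PySem.Set.contains pvStartSet
        (PySem.List.slice (PySem.List.slice cs (some i) (some (i + 13))) (some j) (some (j + 3))))
        [11, 12] = [] from by
      simp only [List.filter_cons, List.filter_nil,
        far_no_start _ hw 11 (by norm_num) (by norm_num),
        far_no_start _ hw 12 (by norm_num) (by norm_num)]
      simp]
  rw [List.append_nil]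
  rw [PySem.List.foldl_ite_eq_foldl_filter
      (p := fun j => PySem.List.slice cs (some (i + j)) (some (i + j + 3)) ∈ pvStartB)
      (f := fun orfs j =>
        ((PySem.List.pyRange 0 (PySem.List.len cs - 2) 1).filter
            (fun p => decide (PySem.List.slice cs (some p) (some (p + 3)) ∈ pvStops))).foldl
            (fun orfs p => if i + j ≤ p ∧ PySem.Int.mod (p - (i + j)) 3 = 0 then
                orfs ++ [PySem.List.slice cs (some (i + j)) (some (p + 3))]
              else orfs) orfs)]
  rw [List.filter_congr (fun j hj => by
      have hb := PySem.List.mem_pyRange_one.mp hj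
      rw [contains_start, slice_window cs i j h0 h1 hb.1 (by omega)])]
  apply PySem.List.foldl_congr_mem
  intro acc j hj
  have hj' := PySem.List.mem_pyRange_one.mp (List.mem_of_mem_filter hj)
  exact orfs_eq cs (i + j) (by omega) (by omega) acc

theorem scanSeq_eq (s : String) : scanSeq s = scanSeq_alt s := by
  simp only [scanSeq, scanSeq_alt]
  have hPP : ∀ i ∈ PySem.List.pyRange 0 (PySem.List.len s.toList - 12) 1,
      decide (29 < scoreMotifA (PySem.List.slice s.toList (some i) (some (i + 13))))
        = decide (29 < scoreB s.toList i) := by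
    intro i hi
    have hb := PySem.List.mem_pyRange_one.mp hi
    rw [PySem.List.len_eq] at hb
    rw [score_eq s.toList i hb.1 (by omega)]
  have hbnd : ∀ i ∈ (PySem.List.pyRange 0 (PySem.List.len s.toList - 12) 1).filter
      (fun i => decide (29 < scoreMotifA (PySem.List.slice s.toList (some i) (some (i + 13))))),
      0 ≤ i ∧ i + 13 ≤ (s.toList.length : Int) := by
    intro i hi
    have := PySem.List.mem_pyRange_one.mp (List.mem_of_mem_filter hi)
    rw [PySem.List.len_eq] at this
    omega
  rw [PySem.List.foldl_congr_mem _ _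
      (fun (acc : List Int × List (List Char)) (i : Int) =>
        ((fun (a : List Int) (i : Int) =>
            if 29 < scoreB s.toList i then a ++ [i] else a) acc.1 i,
         (fun (o : List (List Char)) (i : Int) =>
            if 29 < scoreB s.toList i then
              (PySem.List.pyRange 0 11 1).foldl (fun orfs j =>
                if PySem.List.slice s.toList (some (i + j)) (some (i + j + 3)) ∈ pvStartB then
                  ((PySem.List.pyRange 0 (PySem.List.len s.toList - 2) 1).filter
                    (fun p => decide (PySem.List.slice s.toList (some p) (some (p + 3)) ∈ pvStops))).foldl
                    (fun orfs p => if i + j ≤ p ∧ PySem.Int.mod (p - (i + j)) 3 = 0 then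
                        orfs ++ [PySem.List.slice s.toList (some (i + j)) (some (p + 3))]
                      else orfs) orfs
                else orfs) o
            else o) acc.2 i))
      _ (by intro acc i _
            by_cases h : 29 < scoreB s.toList i <;>
              simp only [h, if_true, if_false])]
  rw [PySem.List.foldl_prod_mk
      (f := fun (a : List Int) (i : Int) =>
        if 29 < scoreB s.toList i then a ++ [i] else a)
      (g := fun (o : List (List Char)) (i : Int) =>
        if 29 < scoreB s.toList i then
          (PySem.List.pyRange 0 11 1).foldl (fun orfs j =>
            if PySem.List.slice s.toList (some (i + j)) (some (i + j + 3)) ∈ pvStartB then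
              ((PySem.List.pyRange 0 (PySem.List.len s.toList - 2) 1).filter
                (fun p => decide (PySem.List.slice s.toList (some p) (some (p + 3)) ∈ pvStops))).foldl
                (fun orfs p => if i + j ≤ p ∧ PySem.Int.mod (p - (i + j)) 3 = 0 then
                    orfs ++ [PySem.List.slice s.toList (some (i + j)) (some (p + 3))]
                  else orfs) orfs
            else orfs) o
        else o)]
  refine Prod.ext ?_ (Prod.ext ?_ ?_)
  · show List.filter _ _ = List.foldl _ [] _
    rw [PySem.List.foldl_append_ite_eq_filter
        (p := fun i => 29 < scoreB s.toList i)]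
    rw [List.nil_append]
    exact List.filter_congr hPP
  all_goals {
    dsimp only
    congr 1
    rw [show List.zip
          (((PySem.List.pyRange 0 (PySem.List.len s.toList - 12) 1).filter
            (fun i => decide (29 < scoreMotifA (PySem.List.slice s.toList (some i) (some (i + 13)))))).map
              (fun i => PySem.List.slice s.toList (some i) (some (i + 13))))
          ((PySem.List.pyRange 0 (PySem.List.len s.toList - 12) 1).filter
            (fun i => decide (29 < scoreMotifA (PySem.List.slice s.toList (some i) (some (i + 13))))))
        = ((PySem.List.pyRange 0 (PySem.List.len s.toList - 12) 1).filter
          (fun i => decide (29 < scoreMotifA (PySem.List.slice s.toList (some i) (some (i + 13)))))).map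
            (fun i => (PySem.List.slice s.toList (some i) (some (i + 13)), i))
      from by simpa using (List.zip_map' (f := fun i : Int => PySem.List.slice s.toList (some i) (some (i + 13))) (g := id))]
    rw [List.foldl_map]
    rw [PySem.List.foldl_ite_eq_foldl_filter
        (p := fun i : Int => 29 < scoreB s.toList i)]
    rw [← List.filter_congr hPP]
    apply PySem.List.foldl_congr_mem
    intro acc i hi
    exact inner_eq s.toList i (hbnd i hi).1 (hbnd i hi).2 acc
  }

-- ===== VERDICT (by name: the statement is the Claim_ definition above) =====
theorem scanSeq_spec : Claim_equal_scanSeq := by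
  intro s _
  unfold Spec_scanSeq
  exact scanSeq_eq s
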